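-- pv_equiv track=rewrite | github.com/Ternary-Project/Compress | final.py | _find_price_column
-- ===== SOURCE A (Python) =====
-- def _find_price_column(columns):
--     """Auto-detect main price column."""
--     keywords = ['close', 'adj close', 'adjclose', 'price', 'last']
--     col_lower = {c: str(c).lower() for c in columns}
--     for kw in keywords:
--         for c, low in col_lower.items():
--             if kw in low:
--                 return c
--     return columns[-1] if columns else 'price'
-- ===== SOURCE B (Python) =====
-- def _find_price_column(columns):
--     """Auto-detect main price column."""
--     keywords = ['close', 'adj close', 'adjclose', 'price', 'last']
--
--     def score(col):
--         low = str(col).lower()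
--         for i, kw in enumerate(keywords):
--             if kw in low:
--                 return i
--         return len(keywords)
--
--     best = len(keywords)
--     best_col = None
--     for c in columns:
--         s = score(c)
--         if s < best:
--             best, best_col = s, c
--     if best_col is not None:
--         return best_col
--     return columns[-1] if columns else 'price'
-- ===== Notes on version B (the rewrite author's own statement) =====
-- stated objective: alternative
-- what changed: Replaced A's keyword-priority nested loops over a lowercased dict with a single pass that scores each column by the index of its first matching keyword and then takes the first column achieving the minimum score (strict-< running argmin), falling back to columns[-1]/'price' when nothing matches.
import Mathlib
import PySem

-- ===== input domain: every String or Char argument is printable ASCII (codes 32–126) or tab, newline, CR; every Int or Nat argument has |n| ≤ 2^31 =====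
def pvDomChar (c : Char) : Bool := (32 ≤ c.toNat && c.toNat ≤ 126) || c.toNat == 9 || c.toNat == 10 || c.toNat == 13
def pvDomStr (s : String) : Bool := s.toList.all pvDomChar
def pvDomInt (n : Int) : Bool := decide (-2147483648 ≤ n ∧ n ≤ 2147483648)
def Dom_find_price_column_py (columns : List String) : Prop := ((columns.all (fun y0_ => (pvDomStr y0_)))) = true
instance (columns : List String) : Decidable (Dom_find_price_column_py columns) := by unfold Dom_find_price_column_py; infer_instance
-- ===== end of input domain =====

-- B replaces A's keyword-priority nested loops with one scoring pass (lowest matching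
-- keyword index per column) followed by a first-argmin fold; objective: alternative.

-- ===== PORT A =====
def paKeywords : List String := ["close", "adj close", "adjclose", "price", "last"]

-- {c: str(c).lower() for c in columns}: the dict's keys are the first occurrences in order
-- (PySem.List.dedup); a duplicate key overwrites with the identical value str(c).lower(),
-- so items = dedup columns paired with their lowercase forms (exact).
def paColLower (columns : List String) : List (String × String) :=
  (PySem.List.dedup columns).map (fun c => (c, PySem.Str.lower c))

def paInner (kw : String) : List (String × String) → Option String
  | [] => none
  | (c, low) :: rest => if PySem.Str.isIn kw low then some c else paInner kw rest

def paOuter (items : List (String × String)) : List String → Option String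
  | [] => none
  | kw :: kws =>
    match paInner kw items with
    | some c => some c
    | none => paOuter items kws

def find_price_column_py (columns : List String) : String :=
  match paOuter (paColLower columns) paKeywords with
  | some c => c
  | none =>
    match PySem.List.pyGet? columns (-1) with
    | some c => c
    | none => "price"

-- ===== PORT B =====
def pbKeywords : List String := ["close", "adj close", "adjclose", "price", "last"]

-- score's 'for i, kw in enumerate(keywords)' loop; returns len(keywords) when nothing matches
def pbScoreGo (low : String) (i : Nat) : List String → Nat
  | [] => pbKeywords.length
  | kw :: rest => if PySem.Str.isIn kw low then i else pbScoreGo low (i + 1) rest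

def pbScore (col : String) : Nat := pbScoreGo (PySem.Str.lower col) 0 pbKeywords

def find_price_column_py_alt (columns : List String) : String :=
  let r := columns.foldl
    (fun (acc : Nat × Option String) c =>
      let s := pbScore c
      if s < acc.1 then (s, some c) else acc)
    (pbKeywords.length, none)
  match r.2 with
  | some c => c
  | none =>
    match PySem.List.pyGet? columns (-1) with
    | some c => c
    | none => "price"

-- ===== PRECONDITION & SPEC =====
def Spec_find_price_column_py (columns : List String) (out : String) : Prop := out = find_price_column_py_alt columns
instance (columns : List String) (out : String) : Decidable (Spec_find_price_column_py columns out) := by unfold Spec_find_price_column_py; infer_instance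

-- ===== CLAIM (what is proved, stated in full; the proofs are below) =====
def Claim_equal_find_price_column_py : Prop := ∀ (columns : List String), Dom_find_price_column_py columns → Spec_find_price_column_py columns (find_price_column_py columns)

-- ===== LEMMAS AND PROOFS =====

-- P kw c: keyword kw occurs in the lowercase form of column c
def pvP (kw c : String) : Bool := PySem.Str.isIn kw (PySem.Str.lower c)

-- index of the first keyword of kws matching c (= kws.length if none)
def pvSc (kws : List String) (c : String) : Nat :=
  match kws with
  | [] => 0
  | kw :: rest => if pvP kw c then 0 else pvSc rest c + 1

-- A's nested loops, with the inner loop as find? over the columns themselves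
def pvAout (kws cols : List String) : Option String :=
  match kws with
  | [] => none
  | kw :: rest =>
    match cols.find? (fun c => pvP kw c) with
    | some c => some c
    | none => pvAout rest cols

-- running minimum of g over cols from seed b
def pvMf (g : String → Nat) (cols : List String) (b : Nat) : Nat :=
  cols.foldl (fun b c => min b (g c)) b

theorem pvMf_le (g : String → Nat) (cols : List String) (b : Nat) : pvMf g cols b ≤ b := by
  induction cols generalizing b with
  | nil => simp [pvMf]
  | cons c t ih =>
    calc pvMf g (c :: t) b = pvMf g t (min b (g c)) := rfl
    _ ≤ min b (g c) := ih _
    _ ≤ b := Nat.min_le_left _ _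

theorem pvMf_le_mem (g : String → Nat) (cols : List String) (b : Nat) (a : String)
    (ha : a ∈ cols) : pvMf g cols b ≤ g a := by
  induction cols generalizing b with
  | nil => cases ha
  | cons c t ih =>
    rcases List.mem_cons.mp ha with h | h
    · subst h
      calc pvMf g (a :: t) b = pvMf g t (min b (g a)) := rfl
      _ ≤ min b (g a) := pvMf_le _ _ _
      _ ≤ g a := Nat.min_le_right _ _
    · exact ih _ h

theorem pvFind?_congr_mem {p q : String → Bool} (l : List String)
    (h : ∀ c ∈ l, p c = q c) : l.find? p = l.find? q := by
  induction l with
  | nil => rfl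
  | cons c t ih =>
    have hc := h c (List.mem_cons_self ..)
    simp only [List.find?]
    rw [hc, ih (fun x hx => h x (List.mem_cons_of_mem _ hx))]

theorem pvMf_shift (f g : String → Nat) (cols : List String)
    (h : ∀ c ∈ cols, g c = f c + 1) (b : Nat) :
    pvMf g cols (b + 1) = pvMf f cols b + 1 := by
  induction cols generalizing b with
  | nil => rfl
  | cons c t ih =>
    have hc := h c (List.mem_cons_self ..)
    have : min (b + 1) (g c) = min b (f c) + 1 := by rw [hc]; omega
    calc pvMf g (c :: t) (b + 1) = pvMf g t (min (b + 1) (g c)) := rfl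
    _ = pvMf g t (min b (f c) + 1) := by rw [this]
    _ = pvMf f t (min b (f c)) + 1 := ih (fun x hx => h x (List.mem_cons_of_mem _ hx)) _
    _ = pvMf f (c :: t) b + 1 := rfl

-- A's nested search = argmin of the per-column score
theorem pvAout_eq (kws cols : List String) :
    pvAout kws cols =
      (if pvMf (pvSc kws) cols kws.length < kws.length
       then cols.find? (fun c => pvSc kws c == pvMf (pvSc kws) cols kws.length)
       else none) := by
  induction kws with
  | nil =>
    have h0 : pvMf (pvSc []) cols 0 = 0 := Nat.le_zero.mp (pvMf_le _ _ _)
    simp [pvAout, h0]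
  | cons kw rest ih =>
    by_cases h : ∃ c ∈ cols, pvP kw c
    · obtain ⟨c0, hc0, hp0⟩ := h
      have hsc0 : pvSc (kw :: rest) c0 = 0 := by simp [pvSc, hp0]
      have hm0 : pvMf (pvSc (kw :: rest)) cols (kw :: rest).length = 0 := by
        have := pvMf_le_mem (pvSc (kw :: rest)) cols (kw :: rest).length c0 hc0
        omega
      have hfind : cols.find? (fun c => pvP kw c) =
          cols.find? (fun c => pvSc (kw :: rest) c == 0) := by
        apply pvFind?_congr_mem
        intro c _
        by_cases hp : pvP kw c <;> simp [pvSc, hp]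
      have hex : (cols.find? (fun c => pvP kw c)).isSome := by
        rw [List.find?_isSome]; exact ⟨c0, hc0, hp0⟩
      rw [hm0]
      simp only [pvAout]
      obtain ⟨c1, hc1⟩ := Option.isSome_iff_exists.mp hex
      rw [hc1]
      rw [hc1] at hfind
      simp [← hfind, List.length_cons]
    · have hfalse : ∀ c ∈ cols, pvP kw c = false := by
        intro c hc
        by_contra hb
        exact h ⟨c, hc, by simpa using hb⟩
      have hnone : cols.find? (fun c => pvP kw c) = none := by
        rw [List.find?_eq_none]
        intro c hc
        simp [hfalse c hc]
      have hshift : ∀ c ∈ cols, pvSc (kw :: rest) c = pvSc rest c + 1 := by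
        intro c hc
        simp [pvSc, hfalse c hc]
      have hmf : pvMf (pvSc (kw :: rest)) cols (rest.length + 1)
          = pvMf (pvSc rest) cols rest.length + 1 :=
        pvMf_shift (pvSc rest) (pvSc (kw :: rest)) cols hshift rest.length
      have hfind2 : cols.find? (fun c => pvSc (kw :: rest) c == pvMf (pvSc rest) cols rest.length + 1)
          = cols.find? (fun c => pvSc rest c == pvMf (pvSc rest) cols rest.length) := by
        apply pvFind?_congr_mem
        intro c hc
        rw [hshift c hc]
        by_cases hq : pvSc rest c = pvMf (pvSc rest) cols rest.length
        · simp [hq]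
        · simp
      simp only [pvAout, hnone, List.length_cons, hmf, ih]
      by_cases hlt : pvMf (pvSc rest) cols rest.length < rest.length
      · rw [if_pos hlt, if_pos (by omega), hfind2]
      · rw [if_neg hlt, if_neg (by omega)]

-- inner loop over the dict items = find? over the dedup'd columns
theorem paInner_eq_find? (kw : String) (cols : List String) :
    paInner kw (cols.map (fun c => (c, PySem.Str.lower c))) = cols.find? (fun c => pvP kw c) := by
  induction cols with
  | nil => rfl
  | cons c t ih =>
    simp only [List.map_cons, paInner, List.find?_cons, pvP]
    cases hp : PySem.Str.isIn kw (PySem.Str.lower c)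
    · simp only [Bool.false_eq_true, if_false]
      simpa only [pvP] using ih
    · simp only [if_true]

-- find? ignores deduplication (first match is among first occurrences)
theorem pvFind?_filter_ne (p : String → Bool) (x : String) (hx : p x = false)
    (s : List String) : (s.filter (fun y => !(y == x))).find? p = s.find? p := by
  induction s with
  | nil => rfl
  | cons c t ih =>
    rw [List.filter_cons]
    by_cases hcx : c = x
    · subst hcx
      rw [if_neg (by simp), ih, List.find?_cons, hx]
    · rw [if_pos (by simp [hcx]), List.find?_cons, List.find?_cons]
      cases hpc : p c
      · exact ih
      · rfl

theorem pvFind?_dedup (p : String → Bool) (xs : List String) :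
    (PySem.List.dedup xs).find? p = xs.find? p := by
  rw [PySem.List.dedup_eq_ofList]
  induction xs with
  | nil => rfl
  | cons x t ih =>
    rw [PySem.Set.ofList_cons]
    by_cases hp : p x
    · simp [List.find?, hp]
    · rw [Bool.not_eq_true] at hp
      simp only [List.find?, hp]
      rw [show PySem.Set.discard (PySem.Set.ofList t) x
            = (PySem.Set.ofList t).filter (fun y => !(y == x)) from rfl]
      rw [pvFind?_filter_ne p x hp, ih]

theorem paOuter_eq_pvAout (cols kws : List String) :
    paOuter (paColLower cols) kws = pvAout kws cols := by
  induction kws with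
  | nil => rfl
  | cons kw rest ih =>
    simp only [paOuter, pvAout, paColLower]
    simp only [paColLower] at ih
    rw [paInner_eq_find?, pvFind?_dedup, ih]

-- B's score = pvSc over the full keyword list
theorem pbScoreGo_eq (c : String) (kws : List String) (i : Nat)
    (h : i + kws.length = pbKeywords.length) :
    pbScoreGo (PySem.Str.lower c) i kws = i + pvSc kws c := by
  induction kws generalizing i with
  | nil =>
    simp only [List.length_nil] at h
    simp only [pbScoreGo, pvSc]
    omega
  | cons kw rest ih =>
    by_cases hp : pvP kw c
    · have hp' : PySem.Str.isIn kw (PySem.Str.lower c) = true := hp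
      simp only [pbScoreGo, pvSc, pvP, hp', if_true]
      omega
    · have hp' : PySem.Str.isIn kw (PySem.Str.lower c) = false := by
        simpa [pvP] using hp
      simp only [pbScoreGo, pvSc, pvP, hp', Bool.false_eq_true, if_false]
      have := ih (i + 1) (by simp at h ⊢; omega)
      omega

theorem pbScore_eq (c : String) : pbScore c = pvSc pbKeywords c := by
  have := pbScoreGo_eq c pbKeywords 0 (by simp)
  simpa [pbScore] using this

-- B's fold: second component is the first column achieving the running minimum
theorem pvBfold_snd (g : String → Nat) (cols : List String) (b : Nat) (o : Option String) :
    (cols.foldl (fun (acc : Nat × Option String) c =>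
        if g c < acc.1 then (g c, some c) else acc) (b, o)).2 =
      (if pvMf g cols b < b
       then cols.find? (fun c => g c == pvMf g cols b)
       else o) := by
  induction cols generalizing b o with
  | nil => simp [pvMf]
  | cons c t ih =>
    have hmf : pvMf g (c :: t) b = pvMf g t (min b (g c)) := rfl
    by_cases hc : g c < b
    · have hmin : min b (g c) = g c := by omega
      simp only [List.foldl, if_pos hc, ih, hmf, hmin]
      by_cases hm : pvMf g t (g c) < g c
      · rw [if_pos hm, if_pos (by omega)]
        have : (g c == pvMf g t (g c)) = false := by simp; omega
        simp [List.find?, this]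
      · have heq : pvMf g t (g c) = g c := by
          have := pvMf_le g t (g c); omega
        rw [if_neg hm, heq, if_pos hc]
        simp [List.find?]
    · have hmin : min b (g c) = b := by omega
      simp only [List.foldl, if_neg hc, ih, hmf, hmin]
      by_cases hm : pvMf g t b < b
      · rw [if_pos hm, if_pos hm]
        have : (g c == pvMf g t b) = false := by simp; omega
        simp [List.find?, this]
      · rw [if_neg hm, if_neg hm]

-- ===== VERDICT (by name: the statement is the Claim_ definition above) =====
theorem find_price_column_py_spec : Claim_equal_find_price_column_py := by
  unfold Claim_equal_find_price_column_py
  intro columns _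
  unfold Spec_find_price_column_py
  unfold find_price_column_py find_price_column_py_alt
  have hsc : pbScore = pvSc pbKeywords := funext pbScore_eq
  have hb := pvBfold_snd (pvSc pbKeywords) columns pbKeywords.length none
  rw [paOuter_eq_pvAout, pvAout_eq]
  simp only [hsc, hb]
  have hKK : paKeywords = pbKeywords := rfl
  rw [hKK]
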